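-- pv_equiv track=rewrite | github.com/tianhaoz95/capstone | capstone/rank.py | token_math
-- ===== SOURCE A (Python) =====
-- def token_math(sentence, symbol):
--
--     expres = []
--     splits = sentence.split("$")
--
--     for idx in range(len(splits)):
--         if idx % 2 == 1:
--             expres.append(splits[idx])
--
--             if symbol in splits[idx]:
--                 splits[idx] = "TARGET"
--             else:
--                 splits[idx] = 'MATH'
--
--     return ''.join(splits), expres
-- ===== SOURCE B (Python) =====
-- def token_math(sentence, symbol):
--     # single left-to-right character scan with a parity flag, no split/index pass
--     pieces = []
--     expres = []
--     buf = []
--     math_mode = False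
--     for ch in sentence:
--         if ch == '$':
--             seg = ''.join(buf)
--             if math_mode:
--                 expres.append(seg)
--                 pieces.append('TARGET' if symbol in seg else 'MATH')
--             else:
--                 pieces.append(seg)
--             buf = []
--             math_mode = not math_mode
--         else:
--             buf.append(ch)
--     seg = ''.join(buf)
--     if math_mode:
--         expres.append(seg)
--         pieces.append('TARGET' if symbol in seg else 'MATH')
--     else:
--         pieces.append(seg)
--     return ''.join(pieces), expres
-- ===== Notes on version B (the rewrite author's own statement) =====
-- stated objective: alternative
-- what changed: Replaces split('$') followed by an index loop that mutates the split list with a single left-to-right character scan maintaining a segment buffer and a parity flag, emitting each segment as it is closed.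
import Mathlib
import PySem

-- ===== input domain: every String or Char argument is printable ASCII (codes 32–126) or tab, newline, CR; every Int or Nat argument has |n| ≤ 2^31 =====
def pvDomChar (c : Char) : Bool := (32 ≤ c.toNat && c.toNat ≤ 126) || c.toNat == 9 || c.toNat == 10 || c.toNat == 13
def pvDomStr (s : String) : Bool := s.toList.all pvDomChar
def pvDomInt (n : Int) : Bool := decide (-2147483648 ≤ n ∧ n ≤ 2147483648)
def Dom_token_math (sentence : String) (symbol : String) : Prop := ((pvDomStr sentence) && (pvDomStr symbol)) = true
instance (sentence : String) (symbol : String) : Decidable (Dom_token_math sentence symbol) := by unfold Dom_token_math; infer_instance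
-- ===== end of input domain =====

-- B replaces A's split('$')-then-index-loop (which mutates the split list) by a single
-- left-to-right character scan with a segment buffer and a parity flag (objective: alternative).

-- ===== PORT A =====
-- the for-loop over range(len(splits)): odd indices are recorded in expres and replaced by a label
def tmLoopA (sym : List Char) : List (List Char) → Nat → List (List Char) × List (List Char)
  | [], _ => ([], [])
  | p :: rest, idx =>
    let (rs, es) := tmLoopA sym rest (idx + 1)
    if idx % 2 == 1 then
      ((if PySem.Chars.isIn sym p then "TARGET".toList else "MATH".toList) :: rs, p :: es)
    else (p :: rs, es)

def token_math (sentence : String) (symbol : String) : String × List String :=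
  let splits := PySem.Chars.splitOn sentence.toList "$".toList
  let res := tmLoopA symbol.toList splits 0
  (String.ofList (PySem.Chars.join [] res.1), res.2.map String.ofList)

-- ===== PORT B =====
def tmLabel (sym buf : List Char) : List Char :=
  if PySem.Chars.isIn sym buf then "TARGET".toList else "MATH".toList

-- one pass over the characters: buf = current segment, math = parity of '$' seen so far
def tmScanB (sym : List Char) : List Char → List Char → Bool → List (List Char) → List (List Char) → List Char × List (List Char)
  | [], buf, math, pieces, expres =>
    if math then (PySem.Chars.join [] (pieces ++ [tmLabel sym buf]), expres ++ [buf])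
    else (PySem.Chars.join [] (pieces ++ [buf]), expres)
  | c :: cs, buf, math, pieces, expres =>
    if c = '$' then
      if math then tmScanB sym cs [] false (pieces ++ [tmLabel sym buf]) (expres ++ [buf])
      else tmScanB sym cs [] true (pieces ++ [buf]) expres
    else tmScanB sym cs (buf ++ [c]) math pieces expres

def token_math_alt (sentence : String) (symbol : String) : String × List String :=
  let res := tmScanB symbol.toList sentence.toList [] false [] []
  (String.ofList res.1, res.2.map String.ofList)

-- ===== PRECONDITION & SPEC =====
def Spec_token_math (sentence : String) (symbol : String) (out : String × List String) : Prop := out = token_math_alt sentence symbol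
instance (sentence : String) (symbol : String) (out : String × List String) : Decidable (Spec_token_math sentence symbol out) := by unfold Spec_token_math; infer_instance

-- ===== CLAIM (what is proved, stated in full; the proofs are below) =====
def Claim_equal_token_math : Prop := ∀ (sentence : String) (symbol : String), Dom_token_math sentence symbol → Spec_token_math sentence symbol (token_math sentence symbol)

-- ===== LEMMAS AND PROOFS =====

-- reference split on a single '$'
def pvSplit : List Char → List (List Char)
  | [] => [[]]
  | c :: cs =>
    if c = '$' then [] :: pvSplit cs
    else (c :: (pvSplit cs).headI) :: (pvSplit cs).tail

-- common functional core: label the odd (math) segments, collect them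
def pvEmit (sym : List Char) : List (List Char) → Bool → List (List Char) × List (List Char)
  | [], _ => ([], [])
  | s :: rest, math =>
    if math then (tmLabel sym s :: (pvEmit sym rest (!math)).1, s :: (pvEmit sym rest (!math)).2)
    else (s :: (pvEmit sym rest (!math)).1, (pvEmit sym rest (!math)).2)

theorem pvSplit_cons_headI_tail (cs : List Char) :
    pvSplit cs = (pvSplit cs).headI :: (pvSplit cs).tail := by
  cases cs with
  | nil => rfl
  | cons c cs => by_cases h : c = '$' <;> simp [pvSplit, h]

theorem pvGo_spec (cs : List Char) : ∀ (fuel : Nat) (cur : List Char) (acc : List (List Char)),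
    cs.length < fuel →
    PySem.Chars.splitOn.go "$".toList fuel cs cur acc
      = acc.reverse ++ (cur.reverse ++ (pvSplit cs).headI) :: (pvSplit cs).tail := by
  induction cs with
  | nil =>
    intro fuel cur acc h
    cases fuel with
    | zero => omega
    | succ f => simp [PySem.Chars.splitOn.go, pvSplit]
  | cons c rest ih =>
    intro fuel cur acc h
    cases fuel with
    | zero => omega
    | succ f =>
      by_cases hc : c = '$'
      · have hpre : ("$".toList).isPrefixOf (c :: rest) = true := by
          simp [List.isPrefixOf, hc]
        have hdrop : List.drop "$".toList.length (c :: rest) = rest := by simp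
        rw [PySem.Chars.splitOn.go]
        simp only [hpre, if_pos]
        rw [hdrop, ih f [] (cur.reverse :: acc) (by simpa using Nat.lt_of_succ_lt_succ h)]
        rw [pvSplit]
        simp [hc, ← pvSplit_cons_headI_tail rest]
      · have hpre : ("$".toList).isPrefixOf (c :: rest) = false := by
          simp [List.isPrefixOf]
          exact fun h' => hc h'.symm
        rw [PySem.Chars.splitOn.go]
        simp only [hpre, Bool.false_eq_true, if_false]
        rw [ih f (c :: cur) acc (by simpa using Nat.lt_of_succ_lt_succ h)]
        rw [pvSplit]
        simp [hc]

theorem pvSplitOn_eq (cs : List Char) :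
    PySem.Chars.splitOn cs "$".toList = pvSplit cs := by
  unfold PySem.Chars.splitOn
  rw [pvGo_spec cs (cs.length + 1) [] [] (by omega)]
  simpa using (pvSplit_cons_headI_tail cs).symm

theorem pvParity_flip (idx : Nat) : ((idx + 1) % 2 == 1) = !(idx % 2 == 1) := by
  rcases Nat.mod_two_eq_zero_or_one idx with h | h <;> simp [Nat.add_mod, h]

theorem pvLoopA_eq (sym : List Char) (segs : List (List Char)) : ∀ idx : Nat,
    tmLoopA sym segs idx = pvEmit sym segs (idx % 2 == 1) := by
  induction segs with
  | nil => intro idx; rfl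
  | cons p rest ih =>
    intro idx
    rw [tmLoopA, pvEmit, ih (idx + 1), pvParity_flip idx]
    by_cases h : (idx % 2 == 1) = true
    · simp [h, tmLabel]
    · simp only [Bool.not_eq_true] at h
      simp [h]

theorem pvScanB_eq (sym : List Char) (cs : List Char) :
    ∀ (buf : List Char) (math : Bool) (pieces expres : List (List Char)),
    tmScanB sym cs buf math pieces expres
      = (PySem.Chars.join []
          (pieces ++ (pvEmit sym (((buf ++ (pvSplit cs).headI) :: (pvSplit cs).tail)) math).1),
         expres ++ (pvEmit sym (((buf ++ (pvSplit cs).headI) :: (pvSplit cs).tail)) math).2) := by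
  induction cs with
  | nil =>
    intro buf math pieces expres
    cases math <;> simp [tmScanB, pvSplit, pvEmit]
  | cons c rest ih =>
    intro buf math pieces expres
    by_cases hc : c = '$'
    · subst hc
      have hrest := pvSplit_cons_headI_tail rest
      have hsp : pvSplit ('$' :: rest) = [] :: pvSplit rest := by simp [pvSplit]
      cases math with
      | false =>
        rw [tmScanB, if_pos rfl, if_neg Bool.false_ne_true]
        rw [ih [] true (pieces ++ [buf]) expres, hsp]
        conv_rhs => rw [pvEmit]
        simp [← hrest]
      | true =>
        rw [tmScanB, if_pos rfl, if_pos rfl]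
        rw [ih [] false (pieces ++ [tmLabel sym buf]) (expres ++ [buf]), hsp]
        conv_rhs => rw [pvEmit]
        simp [← hrest]
    · have hsp : pvSplit (c :: rest) = (c :: (pvSplit rest).headI) :: (pvSplit rest).tail := by
        simp [pvSplit, hc]
      rw [tmScanB]
      simp only [hc, if_false]
      rw [ih (buf ++ [c]) math pieces expres, hsp]
      simp

-- ===== VERDICT (by name: the statement is the Claim_ definition above) =====
theorem token_math_spec : Claim_equal_token_math := by
  intro sentence symbol _
  unfold Spec_token_math
  simp only [token_math, token_math_alt]
  rw [pvSplitOn_eq, pvLoopA_eq, pvScanB_eq]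
  simp [← pvSplit_cons_headI_tail sentence.toList]
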